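-- pv_equiv track=rewrite | github.com/Teffa14/AutoPTU | auto_ptu/ptu_engine.py | _read_phase_state
-- ===== SOURCE A (Python) =====
-- from typing import List, Dict, Optional, Tuple, Any, Set
--
-- def _read_phase_state(temp_mods:List[str])->Tuple[int, int]:
--     phase = 1
--     turns = 0
--     for entry in temp_mods:
--         if entry.startswith("ai_phase:"):
--             try:
--                 phase = max(1, min(3, int(entry.split(":",1)[1])))
--             except Exception:
--                 continue
--         elif entry.startswith("ai_phase_turns:"):
--             try:
--                 turns = max(0, int(entry.split(":",1)[1]))
--             except Exception:
--                 continue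
--     return phase, turns
-- ===== SOURCE B (Python) =====
-- def _parse(entry):
--     try:
--         return int(entry.split(":", 1)[1])
--     except Exception:
--         return None
--
-- def _read_phase_state(temp_mods):
--     phase, turns = 1, 0
--     phase_found = turns_found = False
--     for entry in reversed(temp_mods):
--         if not phase_found and entry.startswith("ai_phase:"):
--             v = _parse(entry)
--             if v is not None:
--                 phase = max(1, min(3, v))
--                 phase_found = True
--         elif not turns_found and entry.startswith("ai_phase_turns:"):
--             v = _parse(entry)
--             if v is not None:
--                 turns = max(0, v)
--                 turns_found = True
--         if phase_found and turns_found: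
--             break
--     return phase, turns
-- ===== Notes on version B (the rewrite author's own statement) =====
-- stated objective: alternative
-- what changed: B scans temp_mods in reverse with phase_found/turns_found flags and an early break, taking the first valid occurrence from the end instead of A's forward last-write-wins loop.
import Mathlib
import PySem

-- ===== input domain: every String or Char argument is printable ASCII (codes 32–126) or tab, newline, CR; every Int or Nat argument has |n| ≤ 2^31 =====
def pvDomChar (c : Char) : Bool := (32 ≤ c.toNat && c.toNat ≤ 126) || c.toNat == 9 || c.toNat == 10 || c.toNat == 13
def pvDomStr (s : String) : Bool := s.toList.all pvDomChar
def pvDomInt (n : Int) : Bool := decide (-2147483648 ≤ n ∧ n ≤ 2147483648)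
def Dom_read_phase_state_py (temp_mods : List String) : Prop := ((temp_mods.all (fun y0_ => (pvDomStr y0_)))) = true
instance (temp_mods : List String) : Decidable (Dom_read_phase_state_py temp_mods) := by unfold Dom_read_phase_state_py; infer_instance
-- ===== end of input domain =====

-- B is an alternative, not faster: reverse scan with found-flags and early break instead of A's forward last-write-wins loop; return values proved equal.

-- ===== PORT A =====
-- shared transliteration of `int(entry.split(":", 1)[1])`; none = the caught Exception
def pvParseVal (entry : String) : Option Int :=
  ((PySem.Str.splitMax? entry ":" 1).bind (fun ps => PySem.List.pyGet? ps 1)).bind PySem.Int.ofStr?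

def read_phase_state_py (temp_mods : List String) : Int × Int :=
  temp_mods.foldl (fun st entry =>
    if PySem.Str.startswith entry "ai_phase:" then
      match pvParseVal entry with
      | some n => (max 1 (min 3 n), st.2)
      | none => st          -- except: continue
    else if PySem.Str.startswith entry "ai_phase_turns:" then
      match pvParseVal entry with
      | some n => (st.1, max 0 n)
      | none => st          -- except: continue
    else st) (1, 0)

-- ===== PORT B =====
def read_phase_state_py_alt_go : List String → Int → Int → Bool → Bool → Int × Int
  | [], phase, turns, _, _ => (phase, turns)
  | entry :: rest, phase, turns, pf, tf =>
    let (phase, turns, pf, tf) :=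
      if !pf && PySem.Str.startswith entry "ai_phase:" then
        match pvParseVal entry with
        | some v => (max 1 (min 3 v), turns, true, tf)
        | none => (phase, turns, pf, tf)
      else if !tf && PySem.Str.startswith entry "ai_phase_turns:" then
        match pvParseVal entry with
        | some v => (phase, max 0 v, pf, true)
        | none => (phase, turns, pf, tf)
      else (phase, turns, pf, tf)
    if pf && tf then (phase, turns)   -- break
    else read_phase_state_py_alt_go rest phase turns pf tf

def read_phase_state_py_alt (temp_mods : List String) : Int × Int :=
  read_phase_state_py_alt_go temp_mods.reverse 1 0 false false

-- ===== PRECONDITION & SPEC =====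
def Spec_read_phase_state_py (temp_mods : List String) (out : Int × Int) : Prop := out = read_phase_state_py_alt temp_mods
instance (temp_mods : List String) (out : Int × Int) : Decidable (Spec_read_phase_state_py temp_mods out) := by unfold Spec_read_phase_state_py; infer_instance

-- ===== CLAIM (what is proved, stated in full; the proofs are below) =====
def Claim_equal_read_phase_state_py : Prop := ∀ (temp_mods : List String), Dom_read_phase_state_py temp_mods → Spec_read_phase_state_py temp_mods (read_phase_state_py temp_mods)

-- ===== LEMMAS AND PROOFS =====

-- the phase / turns value an entry contributes (none if wrong prefix or parse failure)
def parseP (e : String) : Option Int :=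
  if PySem.Str.startswith e "ai_phase:" then (pvParseVal e).map (fun n => max 1 (min 3 n)) else none
def parseT (e : String) : Option Int :=
  if PySem.Str.startswith e "ai_phase_turns:" then (pvParseVal e).map (fun n => max 0 n) else none

-- the two prefixes are mutually exclusive
theorem not_both (e : String) (h : PySem.Str.startswith e "ai_phase_turns:" = true) :
    PySem.Str.startswith e "ai_phase:" = false := by
  by_contra hc
  have h1 : PySem.Chars.startswith e.toList "ai_phase:".toList = true := by
    simpa using eq_true_of_ne_false hc
  have h2 : PySem.Chars.startswith e.toList "ai_phase_turns:".toList = true := by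
    simpa using h
  have p1 := (PySem.Chars.startswith_iff _ _).mp h1
  have p2 := (PySem.Chars.startswith_iff _ _).mp h2
  have : "ai_phase:".toList <+: "ai_phase_turns:".toList :=
    List.prefix_of_prefix_length_le p1 p2 (by decide)
  exact absurd this (by decide)

-- A as two independent last-write-wins folds
theorem A_as_folds (l : List String) (p t : Int) :
    l.foldl (fun st entry =>
      if PySem.Str.startswith entry "ai_phase:" then
        match pvParseVal entry with
        | some n => (max 1 (min 3 n), st.2)
        | none => st
      else if PySem.Str.startswith entry "ai_phase_turns:" then
        match pvParseVal entry with
        | some n => (st.1, max 0 n)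
        | none => st
      else st) (p, t)
    = (l.foldl (fun a e => (parseP e).getD a) p, l.foldl (fun a e => (parseT e).getD a) t) := by
  induction l generalizing p t with
  | nil => rfl
  | cons e rest ih =>
    simp only [List.foldl_cons]
    by_cases hP : PySem.Str.startswith e "ai_phase:" = true
    · have hT : PySem.Str.startswith e "ai_phase_turns:" = false := by
        by_contra hc
        have := not_both e (eq_true_of_ne_false hc)
        rw [hP] at this; exact Bool.false_ne_true this.symm
      simp at hP hT
      cases hpv : pvParseVal e <;>
        (simp [hP, hT, parseP, parseT, hpv]; exact ih _ _)
    · have hP' : PySem.Str.startswith e "ai_phase:" = false := by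
        cases hb : PySem.Str.startswith e "ai_phase:" <;> simp_all
      by_cases hT : PySem.Str.startswith e "ai_phase_turns:" = true
      · simp at hP' hT
        cases hpv : pvParseVal e <;>
          (simp [hP', hT, parseP, parseT, hpv]; exact ih _ _)
      · have hT' : PySem.Str.startswith e "ai_phase_turns:" = false := by
          cases hb : PySem.Str.startswith e "ai_phase_turns:" <;> simp_all
        simp at hP' hT'
        simp [hP', hT', parseP, parseT]
        exact ih _ _

-- B's loop computes first-match-from-the-front of the (already reversed) list, per flag
theorem B_go_eq (l : List String) : ∀ (p t : Int) (pf tf : Bool),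
    read_phase_state_py_alt_go l p t pf tf =
      ((if pf then p else (l.findSome? parseP).getD p),
       (if tf then t else (l.findSome? parseT).getD t)) := by
  induction l with
  | nil => intro p t pf tf; cases pf <;> cases tf <;> rfl
  | cons e rest ih =>
    intro p t pf tf
    rw [read_phase_state_py_alt_go]
    by_cases hP : PySem.Str.startswith e "ai_phase:" = true
    · have hT : PySem.Str.startswith e "ai_phase_turns:" = false := by
        by_contra hc
        have := not_both e (eq_true_of_ne_false hc)
        rw [hP] at this; exact Bool.false_ne_true this.symm
      simp at hP hT
      cases hpv : pvParseVal e <;> cases pf <;> cases tf <;>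
        simp [hP, hT, parseP, parseT, hpv, ih]
    · have hP' : PySem.Str.startswith e "ai_phase:" = false := by
        cases hb : PySem.Str.startswith e "ai_phase:" <;> simp_all
      by_cases hT : PySem.Str.startswith e "ai_phase_turns:" = true
      · simp at hP' hT
        cases hpv : pvParseVal e <;> cases pf <;> cases tf <;>
          simp [hP', hT, parseP, parseT, hpv, ih]
      · have hT' : PySem.Str.startswith e "ai_phase_turns:" = false := by
          cases hb : PySem.Str.startswith e "ai_phase_turns:" <;> simp_all
        simp at hP' hT'
        cases pf <;> cases tf <;> simp [hP', hT', parseP, parseT, ih]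

-- forward last-write-wins fold = first match of the reversed list
theorem foldl_getD_eq_findSome?_reverse (f : String → Option Int) (l : List String) :
    ∀ (a : Int), l.foldl (fun a e => (f e).getD a) a = (l.reverse.findSome? f).getD a := by
  induction l with
  | nil => intro a; rfl
  | cons e rest ih =>
    intro a
    rw [List.foldl_cons, ih, List.reverse_cons, List.findSome?_append]
    cases h : rest.reverse.findSome? f <;> cases h2 : f e <;> simp [h2, Option.or]

-- ===== VERDICT (by name: the statement is the Claim_ definition above) =====
theorem read_phase_state_py_spec : Claim_equal_read_phase_state_py := by
  intro temp_mods _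
  unfold Spec_read_phase_state_py read_phase_state_py read_phase_state_py_alt
  rw [A_as_folds, B_go_eq]
  simp [foldl_getD_eq_findSome?_reverse]
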